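-- pv_equiv track=rewrite | github.com/Jiayan-Dong/M1-Linux-BPU | replace_pc_phr_higher.py | always_not_taken_branch
-- ===== SOURCE A (Python) =====
-- def always_not_taken_branch(n):
--     bs = "mov w8, #1\n"
--     for i in range(n):
--         if i < 100:
--             bs += "cbz w8, LBB3_" + str(i) + "\n"
--             bs += "LBB3_" + str(i) + ":\n"
--         elif i < 200:
--             bs += "cbz w8, LBB4_" + str(i-100) + "\n"
--             bs += "LBB4_" + str(i-100) + ":\n"
--         elif i < 300:
--             bs += "cbz w8, LBB5_" + str(i-200) + "\n"
--             bs += "LBB5_" + str(i-200) + ":\n"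
--         elif i < 400:
--             bs += "cbz w8, LBB6_" + str(i-300) + "\n"
--             bs += "LBB6_" + str(i-300) + ":\n"
--         else:
--             bs += "cbz w8, LBB7_" + str(i-400) + "\n"
--             bs += "LBB7_" + str(i-400) + ":\n"
--     return bs
-- ===== SOURCE B (Python) =====
-- def always_not_taken_branch(n):
--     parts = ["mov w8, #1\n"]
--     for k in range(5):
--         lo = 100 * k
--         hi = n if k == 4 else min(n, lo + 100)
--         for off in range(max(0, hi - lo)):
--             label = "LBB" + str(k + 3) + "_" + str(off)
--             parts.append("cbz w8, " + label + "\n" + label + ":\n")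
--     return "".join(parts)
-- ===== Notes on version B (the rewrite author's own statement) =====
-- stated objective: alternative
-- what changed: Instead of one pass over range(n) classifying each index with a five-branch cascade, B iterates over the five label blocks, computes each block's extent from n in closed form, and emits that block's labels with block-relative offsets, joining the collected parts at the end.
import Mathlib
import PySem

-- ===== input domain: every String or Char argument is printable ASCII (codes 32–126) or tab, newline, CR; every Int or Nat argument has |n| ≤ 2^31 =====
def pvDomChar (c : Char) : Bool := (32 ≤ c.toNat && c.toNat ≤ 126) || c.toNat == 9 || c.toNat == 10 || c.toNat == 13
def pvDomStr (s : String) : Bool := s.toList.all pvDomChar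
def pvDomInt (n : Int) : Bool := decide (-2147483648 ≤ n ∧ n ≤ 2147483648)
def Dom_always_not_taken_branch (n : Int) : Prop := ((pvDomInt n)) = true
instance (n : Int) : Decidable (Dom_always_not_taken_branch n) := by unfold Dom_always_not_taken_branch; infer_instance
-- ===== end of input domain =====

-- B iterates over the five label blocks, computing each block's extent from n in closed
-- form and emitting each offset label in order, instead of A's single pass over range(n) with a
-- five-branch cascade per index (objective: alternative); return values agree for every n.

-- ===== PORT A =====
def pvStepA (bs : String) (i : Int) : String :=
  if i < 100 then
    bs ++ "cbz w8, LBB3_" ++ PySem.Int.toStr i ++ "\n" ++ "LBB3_" ++ PySem.Int.toStr i ++ ":\n"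
  else if i < 200 then
    bs ++ "cbz w8, LBB4_" ++ PySem.Int.toStr (i - 100) ++ "\n" ++ "LBB4_" ++ PySem.Int.toStr (i - 100) ++ ":\n"
  else if i < 300 then
    bs ++ "cbz w8, LBB5_" ++ PySem.Int.toStr (i - 200) ++ "\n" ++ "LBB5_" ++ PySem.Int.toStr (i - 200) ++ ":\n"
  else if i < 400 then
    bs ++ "cbz w8, LBB6_" ++ PySem.Int.toStr (i - 300) ++ "\n" ++ "LBB6_" ++ PySem.Int.toStr (i - 300) ++ ":\n"
  else
    bs ++ "cbz w8, LBB7_" ++ PySem.Int.toStr (i - 400) ++ "\n" ++ "LBB7_" ++ PySem.Int.toStr (i - 400) ++ ":\n"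

def always_not_taken_branch (n : Int) : String :=
  (PySem.List.pyRange 0 n 1).foldl pvStepA "mov w8, #1\n"

-- ===== PORT B =====
-- inner loop body: one label's two lines, from block number k and offset off
def pvPiece (k off : Int) : String :=
  let label := "LBB" ++ PySem.Int.toStr (k + 3) ++ "_" ++ PySem.Int.toStr off
  "cbz w8, " ++ label ++ "\n" ++ label ++ ":\n"

-- outer loop body: block k's extent computed from n, then the inner loop over offsets
def pvBlock (n : Int) (parts : List String) (k : Int) : List String :=
  let lo := 100 * k
  let hi := if k == 4 then n else min n (lo + 100)
  parts ++ (PySem.List.pyRange 0 (max 0 (hi - lo)) 1).map (pvPiece k)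

def always_not_taken_branch_alt (n : Int) : String :=
  String.join ((PySem.List.pyRange 0 5 1).foldl (pvBlock n) ["mov w8, #1\n"])

-- ===== PRECONDITION & SPEC =====
def Spec_always_not_taken_branch (n : Int) (out : String) : Prop := out = always_not_taken_branch_alt n
instance (n : Int) (out : String) : Decidable (Spec_always_not_taken_branch n out) := by unfold Spec_always_not_taken_branch; infer_instance

-- ===== CLAIM (what is proved, stated in full; the proofs are below) =====
def Claim_equal_always_not_taken_branch : Prop := ∀ (n : Int), Dom_always_not_taken_branch n → Spec_always_not_taken_branch n (always_not_taken_branch n)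

-- ===== LEMMAS AND PROOFS =====

-- the string A's step appends for index i, as a standalone function
def pvChunkA (i : Int) : String :=
  if i < 100 then "cbz w8, LBB3_" ++ PySem.Int.toStr i ++ "\n" ++ "LBB3_" ++ PySem.Int.toStr i ++ ":\n"
  else if i < 200 then "cbz w8, LBB4_" ++ PySem.Int.toStr (i - 100) ++ "\n" ++ "LBB4_" ++ PySem.Int.toStr (i - 100) ++ ":\n"
  else if i < 300 then "cbz w8, LBB5_" ++ PySem.Int.toStr (i - 200) ++ "\n" ++ "LBB5_" ++ PySem.Int.toStr (i - 200) ++ ":\n"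
  else if i < 400 then "cbz w8, LBB6_" ++ PySem.Int.toStr (i - 300) ++ "\n" ++ "LBB6_" ++ PySem.Int.toStr (i - 300) ++ ":\n"
  else "cbz w8, LBB7_" ++ PySem.Int.toStr (i - 400) ++ "\n" ++ "LBB7_" ++ PySem.Int.toStr (i - 400) ++ ":\n"

theorem pvStepA_eq (bs : String) (i : Int) : pvStepA bs i = bs ++ pvChunkA i := by
  unfold pvStepA pvChunkA
  split_ifs <;> simp [String.append_assoc]

theorem pvFoldl_app_shift (l : List String) (a : String) :
    l.foldl (· ++ ·) a = a ++ l.foldl (· ++ ·) "" := by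
  induction l generalizing a with
  | nil => simp
  | cons y ys ih => simp only [List.foldl_cons]; rw [ih (a ++ y), ih ("" ++ y)]; simp [String.append_assoc]

theorem pvJoin_cons (x : String) (xs : List String) :
    String.join (x :: xs) = x ++ String.join xs := by
  simp only [String.join, List.foldl_cons]
  rw [pvFoldl_app_shift xs ("" ++ x)]; simp

theorem pvFoldl_pull (l : List String) (a b : String) :
    l.foldl (· ++ ·) (a ++ b) = a ++ l.foldl (· ++ ·) b := by
  rw [pvFoldl_app_shift l (a ++ b), pvFoldl_app_shift l b, String.append_assoc]

theorem pvFoldl_stepA (l : List Int) (init : String) :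
    l.foldl pvStepA init = init ++ String.join (l.map pvChunkA) := by
  induction l generalizing init with
  | nil => simp [String.join]
  | cons x xs ih =>
    simp only [List.foldl_cons, List.map_cons]
    rw [pvStepA_eq, ih, pvJoin_cons, String.append_assoc]

-- block k's offset list, relabelled, equals A's chunks over the corresponding segment
theorem pvSeg (k hi : Int) (hk : 0 ≤ k) (hk4 : k ≤ 4) (hcap : k < 4 → hi ≤ 100 * k + 100) :
    (PySem.List.pyRange 0 (max 0 (hi - 100 * k)) 1).map (pvPiece k)
      = (PySem.List.pyRange (min (100 * k) hi) hi 1).map pvChunkA := by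
  by_cases hle : hi ≤ 100 * k
  · rw [min_eq_right hle,
      PySem.List.pyRange_one_eq_nil (le_refl hi),
      show max 0 (hi - 100 * k) = 0 by omega,
      PySem.List.pyRange_one_eq_nil (le_refl 0)]
    simp
  · rw [min_eq_left (by omega), PySem.List.pyRange_one, PySem.List.pyRange_one]
    rw [show (max 0 (hi - 100 * k) - 0).toNat = (hi - 100 * k).toNat by omega]
    rw [List.map_map, List.map_map]
    apply List.map_congr_left
    intro j hj
    simp only [List.mem_range] at hj
    have hj' : (j : Int) < hi - 100 * k := by omega
    have hjn : (0 : Int) ≤ (j : Int) := Int.natCast_nonneg j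
    simp only [Function.comp_apply, zero_add]
    interval_cases k
    · have hub : hi ≤ 100 := by have := hcap (by omega); omega
      simp only [pvPiece, pvChunkA, Int.reduceMul, zero_add]
      rw [if_pos (by omega)]
      have h : ("LBB" : String) ++ PySem.Int.toStr 3 ++ "_" = "LBB3_" := by decide
      rw [h]; simp [← String.append_assoc]
    · have hub : hi ≤ 200 := by have := hcap (by omega); omega
      simp only [pvPiece, pvChunkA, Int.reduceAdd, Int.reduceMul]
      rw [if_neg (by omega), if_pos (by omega)]
      rw [show (100 + (j : Int)) - 100 = (j : Int) by ring]
      have h : ("LBB" : String) ++ PySem.Int.toStr 4 ++ "_" = "LBB4_" := by decide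
      rw [h]; simp [← String.append_assoc]
    · have hub : hi ≤ 300 := by have := hcap (by omega); omega
      simp only [pvPiece, pvChunkA, Int.reduceAdd, Int.reduceMul]
      rw [if_neg (by omega), if_neg (by omega), if_pos (by omega)]
      rw [show (200 + (j : Int)) - 200 = (j : Int) by ring]
      have h : ("LBB" : String) ++ PySem.Int.toStr 5 ++ "_" = "LBB5_" := by decide
      rw [h]; simp [← String.append_assoc]
    · have hub : hi ≤ 400 := by have := hcap (by omega); omega
      simp only [pvPiece, pvChunkA, Int.reduceAdd, Int.reduceMul]
      rw [if_neg (by omega), if_neg (by omega), if_neg (by omega), if_pos (by omega)]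
      rw [show (300 + (j : Int)) - 300 = (j : Int) by ring]
      have h : ("LBB" : String) ++ PySem.Int.toStr 6 ++ "_" = "LBB6_" := by decide
      rw [h]; simp [← String.append_assoc]
    · simp only [pvPiece, pvChunkA, Int.reduceAdd, Int.reduceMul]
      rw [if_neg (by omega), if_neg (by omega), if_neg (by omega), if_neg (by omega)]
      rw [show (400 + (j : Int)) - 400 = (j : Int) by ring]
      have h : ("LBB" : String) ++ PySem.Int.toStr 7 ++ "_" = "LBB7_" := by decide
      rw [h]; simp [← String.append_assoc]

-- range(n) split at the block boundaries (clamped to n)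
theorem pvChain (n : Int) : PySem.List.pyRange 0 n 1 =
    PySem.List.pyRange (min 0 (min n 100)) (min n 100) 1
      ++ PySem.List.pyRange (min 100 (min n 200)) (min n 200) 1
      ++ PySem.List.pyRange (min 200 (min n 300)) (min n 300) 1
      ++ PySem.List.pyRange (min 300 (min n 400)) (min n 400) 1
      ++ PySem.List.pyRange (min 400 n) n 1 := by
  by_cases hn : n ≤ 0
  · rw [PySem.List.pyRange_one_eq_nil (by omega), PySem.List.pyRange_one_eq_nil (by omega),
      PySem.List.pyRange_one_eq_nil (by omega), PySem.List.pyRange_one_eq_nil (by omega),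
      PySem.List.pyRange_one_eq_nil (by omega), PySem.List.pyRange_one_eq_nil (by omega)]
    simp
  · rw [show min 0 (min n 100) = 0 by omega, show min 100 (min n 200) = min n 100 by omega,
      show min 200 (min n 300) = min n 200 by omega, show min 300 (min n 400) = min n 300 by omega,
      show min 400 n = min n 400 by omega,
      PySem.List.pyRange_one_append 0 (min n 100) n (by omega) (by omega),
      PySem.List.pyRange_one_append (min n 100) (min n 200) n (by omega) (by omega),
      PySem.List.pyRange_one_append (min n 200) (min n 300) n (by omega) (by omega),
      PySem.List.pyRange_one_append (min n 300) (min n 400) n (by omega) (by omega)]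
    simp [List.append_assoc]

-- ===== VERDICT (by name: the statement is the Claim_ definition above) =====
theorem always_not_taken_branch_spec : Claim_equal_always_not_taken_branch := by
  intro n _
  unfold Spec_always_not_taken_branch always_not_taken_branch always_not_taken_branch_alt
  rw [pvFoldl_stepA]
  rw [show PySem.List.pyRange 0 5 1 = [0, 1, 2, 3, 4] from by decide]
  simp only [List.foldl_cons, List.foldl_nil, pvBlock]
  rw [pvSeg 0 (if ((0:Int) == 4) = true then n else min n (100 * 0 + 100)) (by norm_num)
        (by norm_num) (fun _ => by norm_num),
      pvSeg 1 (if ((1:Int) == 4) = true then n else min n (100 * 1 + 100)) (by norm_num)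
        (by norm_num) (fun _ => by norm_num),
      pvSeg 2 (if ((2:Int) == 4) = true then n else min n (100 * 2 + 100)) (by norm_num)
        (by norm_num) (fun _ => by norm_num),
      pvSeg 3 (if ((3:Int) == 4) = true then n else min n (100 * 3 + 100)) (by norm_num)
        (by norm_num) (fun _ => by norm_num),
      pvSeg 4 (if ((4:Int) == 4) = true then n else min n (100 * 4 + 100)) (by norm_num)
        (by norm_num) (fun h => absurd h (by norm_num))]
  norm_num
  rw [pvChain n]
  simp only [List.map_append, String.join]
  simp only [List.foldl_append, List.foldl_cons]
  simp only [String.empty_append]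
  rw [pvFoldl_app_shift (List.map pvChunkA
        (PySem.List.pyRange (min 0 (min n 100)) (min n 100) 1)) "mov w8, #1\n",
      pvFoldl_pull, pvFoldl_pull, pvFoldl_pull, pvFoldl_pull]
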